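-- pv_equiv track=rewrite | github.com/SeredaVladislav/Repository_my_PC | More/matrix.py | every_element
-- ===== SOURCE A (Python) =====
-- def every_element(symbols: str, quantity_array: int) -> list[list]:
--     """Задание: На вход программе подается строка текста, содержащая символы и число n.
--     Из данной строки формируется список. Напишите программу, которая разделяет
--     список на вложенные подсписки так, что n последовательных элементов принадлежат
--     разным подспискам."""
--
--     result_array = []
--     count = 0
--
--     while count < quantity_array:
--         result_array.append([])
--         for i in symbols[count::quantity_array]:
--             result_array[count].append(i)
--
--         count += 1
--
--     return result_array
-- ===== SOURCE B (Python) =====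
-- def every_element(symbols: str, quantity_array: int) -> list[list]:
--     if quantity_array <= 0:
--         return []
--     result = [[] for _ in range(quantity_array)]
--     for i, ch in enumerate(symbols):
--         result[i % quantity_array].append(ch)
--     return result
-- ===== Notes on version B (the rewrite author's own statement) =====
-- stated objective: idiomatic
-- what changed: Instead of building each bucket with its own stride slice symbols[k::n] in a counting while-loop, B pre-sizes the n buckets and makes one enumerate pass over the string, appending each character to bucket i % n.
import Mathlib
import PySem

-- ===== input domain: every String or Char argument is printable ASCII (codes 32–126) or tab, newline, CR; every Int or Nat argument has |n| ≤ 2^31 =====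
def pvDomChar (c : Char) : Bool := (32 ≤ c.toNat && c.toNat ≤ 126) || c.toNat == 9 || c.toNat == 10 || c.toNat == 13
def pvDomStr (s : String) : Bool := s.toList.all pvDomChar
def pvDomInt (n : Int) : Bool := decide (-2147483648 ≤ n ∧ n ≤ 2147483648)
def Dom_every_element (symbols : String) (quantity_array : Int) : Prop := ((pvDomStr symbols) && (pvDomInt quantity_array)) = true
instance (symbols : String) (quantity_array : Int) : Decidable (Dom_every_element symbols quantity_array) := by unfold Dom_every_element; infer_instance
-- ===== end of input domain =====

-- B replaces A's per-bucket stride slices with a single enumerate pass sending character i to bucket i % n (idiomatic round-robin); same cost.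

-- ===== PORT A =====
-- 'while count < quantity_array: …; count += 1' ⇒ fold over range(0, quantity_array);
-- symbols[count::quantity_array] is slice? with step quantity_array (> 0 inside the loop, so never none; getD [] is the unreachable none case);
-- 'result_array.append([])' followed by appends into result_array[count] builds exactly the row appended here.
def every_element (symbols : String) (quantity_array : Int) : List (List String) :=
  (PySem.List.pyRange 0 quantity_array 1).foldl
    (fun result_array count =>
      let row : List String :=
        ((PySem.Chars.slice? symbols.toList (some count) none quantity_array).getD []).foldl
          (fun r c => r ++ [String.ofList [c]]) []
      result_array ++ [row])
    []

-- ===== PORT B =====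
def every_element_alt (symbols : String) (quantity_array : Int) : List (List String) :=
  if quantity_array ≤ 0 then []
  else
    symbols.toList.zipIdx.foldl
      (fun result ci =>
        result.modify (ci.2 % quantity_array.toNat) (fun b => b ++ [String.ofList [ci.1]]))
      (List.replicate quantity_array.toNat [])

-- ===== PRECONDITION & SPEC =====
def Spec_every_element (symbols : String) (quantity_array : Int) (out : List (List String)) : Prop := out = every_element_alt symbols quantity_array
instance (symbols : String) (quantity_array : Int) (out : List (List String)) : Decidable (Spec_every_element symbols quantity_array out) := by unfold Spec_every_element; infer_instance

-- ===== CLAIM (what is proved, stated in full; the proofs are below) =====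
def Claim_equal_every_element : Prop := ∀ (symbols : String) (quantity_array : Int), Dom_every_element symbols quantity_array → Spec_every_element symbols quantity_array (every_element symbols quantity_array)

-- ===== LEMMAS AND PROOFS =====

-- every n-th character after skipping the first k characters (n fixed, positive): A's bucket shape
def strideGo (n : Nat) : List Char → Nat → List Char
  | [], _ => []
  | c :: cs, 0 => c :: strideGo n cs (n - 1)
  | _ :: cs, k + 1 => strideGo n cs k

-- characters whose absolute position (positions start at o) is ≡ k mod n: B's bucket shape
def pick (n : Nat) : List Char → Nat → Nat → List Char
  | [], _, _ => []
  | c :: cs, o, k => (if o % n = k then [c] else []) ++ pick n cs (o + 1) k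

lemma strideGo_of_le (n : Nat) : ∀ (xs : List Char) (k : Nat), xs.length ≤ k → strideGo n xs k = [] := by
  intro xs
  induction xs with
  | nil => intro k _; rfl
  | cons c cs ih =>
    intro k hk
    match k, hk with
    | k + 1, hk => exact ih k (by simpa using hk)

-- once the index function is out of range for good, extending the index range changes nothing
lemma filterMap_range_extend {α : Type} (f : Nat → Option α) (c₁ c₂ : Nat) (h : c₁ ≤ c₂)
    (hnone : ∀ j, c₁ ≤ j → f j = none) :
    (List.range c₂).filterMap f = (List.range c₁).filterMap f := by
  have : c₂ = c₁ + (c₂ - c₁) := by omega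
  rw [this, List.range_add, List.filterMap_append]
  have h2 : List.filterMap f (List.map (fun x => c₁ + x) (List.range (c₂ - c₁))) = [] := by
    rw [List.filterMap_map, List.filterMap_eq_nil_iff]
    intro j _
    exact hnone _ (Nat.le_add_right _ _)
  rw [h2, List.append_nil]

-- a saturated filterMap over the stride indices k, k+n, k+2n, … is strideGo
lemma filterMap_stride (n : Nat) (hn : 0 < n) :
    ∀ (xs : List Char) (k L : Nat), xs.length ≤ L →
      (List.range L).filterMap (fun j => xs[k + n * j]?) = strideGo n xs k := by
  intro xs
  induction xs with
  | nil => intro k L _; simp [strideGo]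
  | cons c cs ih =>
    intro k L hL
    match k with
    | 0 =>
      match L, hL with
      | L + 1, hL =>
        rw [List.range_succ_eq_map, List.filterMap_cons, List.filterMap_map]
        have hhead : (c :: cs)[0 + n * 0]? = some c := by simp
        rw [hhead]
        have htail : (fun j => (c :: cs)[0 + n * j]?) ∘ Nat.succ = fun j => cs[(n-1) + n * j]? := by
          funext j
          show (c :: cs)[0 + n * (j+1)]? = _
          rw [Nat.mul_succ, show 0 + (n * j + n) = ((n-1) + n*j) + 1 by omega]
          simp
        rw [htail, ih (n-1) L (by simpa using hL)]
        rfl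
    | k + 1 =>
      have hidx : (fun j => (c :: cs)[k + 1 + n * j]?) = fun j => cs[k + n * j]? := by
        funext j
        rw [show k + 1 + n * j = (k + n*j) + 1 by omega]
        simp
      rw [hidx, ih k L (by simpa using Nat.le_of_succ_le hL)]
      rfl

-- the positive-step slice xs[k::n] is strideGo
lemma slice?_eq_strideGo (xs : List Char) (k n : Nat) (hn : 0 < n) :
    PySem.List.slice? xs (some (k : Int)) none (n : Int) = some (strideGo n xs k) := by
  by_cases hkL : xs.length ≤ k
  · rw [strideGo_of_le n xs k hkL]
    simp only [PySem.List.slice?, PySem.List.sliceIndices]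
    have h1 : ¬ ((n:Int) < 0) := by omega
    have h2 : ¬ ((k:Int) < 0) := by omega
    simp only [if_neg h1, if_neg (by omega : ¬ ((n:Int) = 0)), if_neg h2]
    have hmin : min (k:Int) (xs.length : Int) = (xs.length : Int) := by omega
    rw [hmin]
    simp
  · rw [Nat.not_le] at hkL
    set L := xs.length with hLdef
    simp only [PySem.List.slice?, PySem.List.sliceIndices]
    have h1 : ¬ ((n:Int) < 0) := by omega
    have h2 : ¬ ((k:Int) < 0) := by omega
    simp only [if_neg h1, if_neg (by omega : ¬ ((n:Int) = 0)), if_neg h2]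
    have hmin : min (k:Int) (L : Int) = (k : Int) := by omega
    rw [hmin]
    have hlt : ((k:Int) < (L:Int)) := by exact_mod_cast hkL
    rw [if_pos (by omega : (0:Int) < (n:Int)), if_pos hlt]
    have hnum : ((L:Int) - k + n - 1) = ((L - k - 1 + n : Nat) : Int) := by push_cast; omega
    have hcount : (((L:Int) - k + n - 1) / n).toNat = (L - k - 1) / n + 1 := by
      rw [hnum, ← Int.natCast_div, Int.toNat_natCast, Nat.add_div_right _ hn]
    rw [hcount]
    congr 1
    have hidx : (fun j : Nat => xs[((k:Int) + n * j).toNat]?) = fun j => xs[k + n * j]? := by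
      funext j
      have hc : ((k:Int) + n * j) = ((k + n * j : Nat) : Int) := by push_cast; ring
      rw [hc, Int.toNat_natCast]
    calc List.filterMap (fun j : Nat => xs[((k:Int) + (n:Int) * (j:Int)).toNat]?) (List.range ((L - k - 1) / n + 1))
        = List.filterMap (fun j => xs[k + n * j]?) (List.range ((L - k - 1) / n + 1)) := by rw [hidx]
      _ = List.filterMap (fun j => xs[k + n * j]?) (List.range L) := by
          refine (filterMap_range_extend _ _ _ ?_ ?_).symm
          · have := Nat.div_le_self (L - k - 1) n
            omega
          · intro j hj
            have hout : L ≤ k + n * j := by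
              by_contra hcon
              have h3 : j * n ≤ L - k - 1 := by rw [Nat.mul_comm]; omega
              have h4 : j ≤ (L - k - 1) / n := Nat.le_div_iff_mul_le hn |>.mpr h3
              omega
            simp
            omega
      _ = strideGo n xs k := filterMap_stride n hn xs k L (le_refl _)

-- B's bucket shape equals A's: pick n xs o k = strideGo n xs d whenever d is k's distance from the current offset
lemma pick_eq_strideGo (n : Nat) (hn : 0 < n) :
    ∀ (xs : List Char) (o d k : Nat), d < n → (d + o) % n = k →
      pick n xs o k = strideGo n xs d := by
  intro xs
  induction xs with
  | nil => intros; rfl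
  | cons c cs ih =>
    intro o d k hd hk
    by_cases h0 : d = 0
    · subst h0
      have hok : o % n = k := by simpa using hk
      simp only [pick, hok, if_pos, strideGo]
      refine congrArg _ (ih (o+1) (n-1) k (by omega) ?_)
      have h1 : n - 1 + (o + 1) = o + n := by omega
      rw [h1, Nat.add_mod_right, hok]
    · have hok : ¬ (o % n = k) := by
        intro hc
        have hmod : (d + o) % n = o % n := by rw [hk, hc]
        have hdvd : n ∣ d := by
          have := (Nat.modEq_iff_dvd' (Nat.le_add_left o d)).mp (Nat.ModEq.symm hmod)
          simpa using this
        exact h0 (Nat.eq_zero_of_dvd_of_lt hdvd hd)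
      match d, h0 with
      | d + 1, _ =>
        simp only [pick, hok, strideGo]
        exact ih (o+1) d k (by omega) (by rw [show d + (o+1) = d + 1 + o by omega, hk])

-- B's loop invariant: folding the enumerate pass appends pick n xs o k to bucket k
lemma foldB_invariant (n : Nat) :
    ∀ (xs : List Char) (o : Nat) (acc : List (List String)), acc.length = n →
      (xs.zipIdx o).foldl
          (fun result ci => result.modify (ci.2 % n) (fun b => b ++ [String.ofList [ci.1]])) acc
        = acc.mapIdx (fun k b => b ++ (pick n xs o k).map (fun c => String.ofList [c])) := by
  intro xs
  induction xs with
  | nil =>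
    intro o acc _
    simp only [List.zipIdx_nil, List.foldl_nil, pick, List.map_nil, List.append_nil]
    apply List.ext_getElem <;> simp
  | cons c cs ih =>
    intro o acc hacc
    rw [List.zipIdx_cons, List.foldl_cons]
    rw [ih (o+1) _ (by simpa using hacc)]
    apply List.ext_getElem
    · simp
    · intro i h1 h2
      simp only [List.getElem_mapIdx, List.getElem_modify]
      by_cases hik : o % n = i
      · rw [if_pos hik]
        simp only [pick, hik, if_pos, List.map_append, List.map_cons, List.map_nil]
        rw [List.append_assoc]
      · rw [if_neg hik]
        have : (o % n = i) = False := by simp [hik]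
        simp only [pick, this, if_false, List.nil_append]

-- ===== VERDICT (by name: the statement is the Claim_ definition above) =====
theorem every_element_spec : Claim_equal_every_element := by
  intro symbols quantity_array _
  unfold Spec_every_element
  by_cases hq : quantity_array ≤ 0
  · unfold every_element every_element_alt
    rw [if_pos hq]
    have hr : PySem.List.pyRange 0 quantity_array 1 = [] := by
      unfold PySem.List.pyRange
      rw [if_neg (by omega : (1:Int) ≠ 0), if_pos (by omega : (0:Int) < 1),
        if_neg (by omega : ¬ ((0:Int) < quantity_array))]
      rfl
    rw [hr]
    rfl
  · obtain ⟨n, rfl⟩ : ∃ n : Nat, quantity_array = (n : Int) :=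
      ⟨quantity_array.toNat, (Int.toNat_of_nonneg (by omega)).symm⟩
    have hn : 0 < n := by omega
    set cs := symbols.toList with hcs
    unfold every_element every_element_alt
    rw [if_neg hq]
    -- A's fold over range(0, n) becomes a map of stride slices, each rewritten to strideGo
    rw [PySem.List.pyRange_zero_natCast, List.foldl_map]
    have hrow : ∀ k : Nat,
        ((PySem.Chars.slice? cs (some ((k : Nat) : Int)) none (n : Int)).getD []).foldl
          (fun r c => r ++ [String.ofList [c]]) []
        = (strideGo n cs k).map (fun c => String.ofList [c]) := by
      intro k
      rw [PySem.Chars.slice?_eq_listSlice?, slice?_eq_strideGo cs k n hn]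
      simp only [Option.getD_some]
      rw [PySem.List.foldl_append_singleton_eq_map]
      rfl
    have hA : (List.range n).foldl
        (fun result_array k =>
          result_array ++
            [((PySem.Chars.slice? cs (some ((k : Nat) : Int)) none (n : Int)).getD []).foldl
              (fun r c => r ++ [String.ofList [c]]) []]) []
        = (List.range n).map (fun k => (strideGo n cs k).map (fun c => String.ofList [c])) := by
      rw [PySem.List.foldl_append_singleton_eq_map]
      simp only [List.nil_append]
      exact List.map_congr_left (fun k _ => hrow k)
    rw [hA]
    -- B's fold is resolved by its invariant, then compared bucket by bucket
    rw [show ((n : Int)).toNat = n from Int.toNat_natCast n]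
    rw [foldB_invariant n cs 0 (List.replicate n []) (by simp)]
    apply List.ext_getElem
    · simp
    · intro i h1 h2
      simp only [List.getElem_map, List.getElem_range, List.getElem_mapIdx, List.getElem_replicate,
        List.nil_append]
      have hi : i < n := by simpa using h1
      rw [pick_eq_strideGo n hn cs 0 i i hi (by simpa using Nat.mod_eq_of_lt hi)]
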